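-- pv_equiv track=rewrite | github.com/tracy9604/leetcode_python | daily/common.py | power_array
-- ===== SOURCE A (Python) =====
-- def power_array(nums: list[int], k: int) -> list[int]:
--     n = len(nums)
--     result = []
--
--     for i in range(n-k+1):
--         subarray = nums[i: i+k]
--         if all(subarray[j] <= subarray[j+1] for j in range(k-1)):
--             result.append(max(subarray))
--         else:
--             result.append(-1)
--     return result
-- ===== SOURCE B (Python) =====
-- def power_array(nums: list[int], k: int) -> list[int]:
--     # One pass: maintain the length of the non-decreasing run ending at i.
--     # A window of size k is non-decreasing iff run >= k, and its max is then
--     # its last element.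
--     n = len(nums)
--     result = []
--     run = 1
--     for i in range(n):
--         if i > 0 and nums[i - 1] <= nums[i]:
--             run += 1
--         elif i > 0:
--             run = 1
--         if i >= k - 1:
--             result.append(nums[i] if run >= k else -1)
--     return result
-- ===== Notes on version B (the rewrite author's own statement) =====
-- stated objective: faster
-- what changed: Replaces the per-window slice + adjacency scan + max with a single pass maintaining the length of the non-decreasing run ending at each index (window is sorted iff run >= k, and its max is then its last element).
-- outside the precondition, e.g. on power_array([1, 2], 0): A raises ValueError, B returns [1, 2]
import Mathlib
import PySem

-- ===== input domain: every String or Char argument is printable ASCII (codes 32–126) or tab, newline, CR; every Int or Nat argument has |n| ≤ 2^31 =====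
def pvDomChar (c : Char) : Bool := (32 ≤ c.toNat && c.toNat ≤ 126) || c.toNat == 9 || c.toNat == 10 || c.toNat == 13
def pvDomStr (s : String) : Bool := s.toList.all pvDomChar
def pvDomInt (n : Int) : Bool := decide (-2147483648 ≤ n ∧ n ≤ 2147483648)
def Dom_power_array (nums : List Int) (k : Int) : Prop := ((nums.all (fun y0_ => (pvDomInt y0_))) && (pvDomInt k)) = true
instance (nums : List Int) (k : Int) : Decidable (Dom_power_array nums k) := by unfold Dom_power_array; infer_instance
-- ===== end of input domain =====

-- B replaces the per-window slice/scan/max of A with a single pass that maintains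
-- the length of the non-decreasing run ending at each index (asymptotically faster).

-- ===== PORT A =====
-- literal transliteration of A; pyGetD defaults and the max?.getD default are
-- unreachable under Pre_ (indices in range, window nonempty).
def power_array (nums : List Int) (k : Int) : List Int :=
  let n : Int := nums.length
  (PySem.List.pyRange 0 (n - k + 1) 1).foldl (fun result i =>
    let subarray := PySem.List.slice nums (some i) (some (i + k))
    if (PySem.List.pyRange 0 (k - 1) 1).all (fun j =>
        decide (PySem.List.pyGetD subarray j 0 ≤ PySem.List.pyGetD subarray (j + 1) 0)) then
      result ++ [(PySem.List.max? subarray (fun y => y)).getD 0]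
    else
      result ++ [-1]) []

-- ===== PORT B =====
-- transliteration of Source B: one pass, state = (result, run).
def power_array_alt (nums : List Int) (k : Int) : List Int :=
  let n : Int := nums.length
  ((PySem.List.pyRange 0 n 1).foldl (fun (st : List Int × Int) i =>
      let result := st.1
      let run := st.2
      let run :=
        if 0 < i ∧ PySem.List.pyGetD nums (i - 1) 0 ≤ PySem.List.pyGetD nums i 0 then run + 1
        else if 0 < i then 1 else run
      let result :=
        if k - 1 ≤ i then
          result ++ [if k ≤ run then PySem.List.pyGetD nums i 0 else -1]
        else result
      (result, run)) ([], (1 : Int))).1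

-- ===== PRECONDITION & SPEC =====
-- Pre_ excludes k ≤ 0, on which A raises ValueError (max of an empty slice).
def Pre_power_array (nums : List Int) (k : Int) : Prop := 1 ≤ k
instance (nums : List Int) (k : Int) : Decidable (Pre_power_array nums k) := by
  unfold Pre_power_array; infer_instance
def pvWitness_power_array : List Int × Int := ([1, 2, 3, 2, 5], 3)

def Spec_power_array (nums : List Int) (k : Int) (out : List Int) : Prop := out = power_array_alt nums k
instance (nums : List Int) (k : Int) (out : List Int) : Decidable (Spec_power_array nums k out) := by unfold Spec_power_array; infer_instance

-- ===== CLAIM (what is proved, stated in full; the proofs are below) =====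
def Claim_equal_power_array : Prop := ∀ (nums : List Int) (k : Int), Dom_power_array nums k → Pre_power_array nums k → Spec_power_array nums k (power_array nums k)

-- ===== LEMMAS AND PROOFS =====

-- nums[j] with default 0 (always used in range)
def pvG (nums : List Int) (j : Nat) : Int := nums.getD j 0

-- length of the non-decreasing run ending just before position m (B's `run` after m steps)
def pvS (nums : List Int) : Nat → Nat
  | 0 => 1
  | m + 1 =>
    if 0 < m ∧ pvG nums (m - 1) ≤ pvG nums m then pvS nums m + 1
    else if 0 < m then 1 else pvS nums m

-- the common specification both ports are reduced to
def pvSpec (nums : List Int) (κ : Nat) : List Int :=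
  (List.range (nums.length + 1 - κ)).map (fun i =>
    if κ ≤ pvS nums (i + κ) then pvG nums (i + κ - 1) else -1)

lemma pvS_pos (nums : List Int) (m : Nat) : 1 ≤ pvS nums m := by
  induction m with
  | zero => simp [pvS]
  | succ m ih => unfold pvS; split_ifs <;> omega

-- streak characterisation: c ≤ pvS m  ↔  the last c elements of the m-prefix are non-decreasing
lemma pvS_ge_iff (nums : List Int) (m c : Nat) (hc : 1 ≤ c) (hm : c ≤ m) :
    c ≤ pvS nums m ↔ ∀ j, m - c ≤ j → j + 1 < m → pvG nums j ≤ pvG nums (j + 1) := by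
  induction m generalizing c with
  | zero => omega
  | succ m ih =>
    rcases Nat.lt_or_ge 1 c with hc2 | hc1
    · -- c ≥ 2, hence m ≥ 1
      have hm1 : 1 ≤ m := by omega
      have h0 : 0 < m := hm1
      have hstep : pvS nums (m + 1) =
          if 0 < m ∧ pvG nums (m - 1) ≤ pvG nums m then pvS nums m + 1 else 1 := by
        conv_lhs => rw [pvS]
        by_cases hadj' : pvG nums (m - 1) ≤ pvG nums m
        · rw [if_pos ⟨h0, hadj'⟩, if_pos ⟨h0, hadj'⟩]
        · rw [if_neg (by tauto), if_pos h0, if_neg (by tauto)]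
      by_cases hadj : pvG nums (m - 1) ≤ pvG nums m
      · have : pvS nums (m + 1) = pvS nums m + 1 := by
          rw [hstep, if_pos ⟨h0, hadj⟩]
        rw [this]
        have := ih (c - 1) (by omega) (by omega)
        constructor
        · intro h j hj hjm
          rcases Nat.lt_or_ge (j + 1) m with hlt | hge
          · exact (this.mp (by omega)) j (by omega) hlt
          · have : j = m - 1 := by omega
            subst this
            have : m - 1 + 1 = m := by omega
            rw [this]; exact hadj
        · intro h
          have : c - 1 ≤ pvS nums m := this.mpr (fun j hj hjm => h j (by omega) (by omega))
          omega
      · have h1 : pvS nums (m + 1) = 1 := by rw [hstep]; simp [hadj]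
        rw [h1]
        constructor
        · intro h; omega
        · intro h
          exfalso
          have := h (m - 1) (by omega) (by omega)
          have hmm : m - 1 + 1 = m := by omega
          rw [hmm] at this
          exact hadj this
    · -- c = 1
      have : c = 1 := by omega
      subst this
      constructor
      · intro _ j hj hjm; omega
      · intro _; exact pvS_pos nums (m + 1)

-- non-decreasing chain ⇒ running max is the last element
lemma pvFoldlMaxLast (t : List Int) : ∀ x : Int, List.IsChain (· ≤ ·) (x :: t) →
    t.foldl max x = (x :: t).getLast (by simp) := by
  induction t with
  | nil => intro x _; simp
  | cons y t ih =>
    intro x hch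
    have h1 : x ≤ y := (List.isChain_cons_cons.mp hch).1
    have h2 : List.IsChain (· ≤ ·) (y :: t) := (List.isChain_cons_cons.mp hch).2
    have : List.foldl max x (y :: t) = List.foldl max y t := by
      simp [List.foldl_cons, max_eq_right h1]
    rw [this, ih y h2]
    simp [List.getLast_cons]

lemma pvIteAppend (r : List Int) (c : Prop) [inst : Decidable c] (u v : Int) :
    (if c then r ++ [u] else r ++ [v]) = r ++ [if c then u else v] := by
  split_ifs <;> rfl

-- A's window value at start index i equals the spec's entry
lemma pvA_entry (nums : List Int) (k : Int) (hk : 1 ≤ k) (i : Nat)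
    (hi : i + k.toNat ≤ nums.length) :
    (if (PySem.List.pyRange 0 (k - 1) 1).all (fun j =>
        decide (PySem.List.pyGetD (PySem.List.slice nums (some (i : Int)) (some ((i : Int) + k))) j 0 ≤
          PySem.List.pyGetD (PySem.List.slice nums (some (i : Int)) (some ((i : Int) + k))) (j + 1) 0)) then
      (PySem.List.max? (PySem.List.slice nums (some (i : Int)) (some ((i : Int) + k))) (fun y => y)).getD 0
    else (-1 : Int))
    = if k.toNat ≤ pvS nums (i + k.toNat) then pvG nums (i + k.toNat - 1) else -1 := by
  set κ := k.toNat with hκdef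
  have hκ : 1 ≤ κ := by omega
  have hk1 : k = (κ : Int) := by omega
  have hb : (i : Int) + k = ((i + κ : Nat) : Int) := by omega
  rw [hb, PySem.List.slice_natCast]
  have hdr : (i + κ) - i = κ := by omega
  rw [hdr]
  set sub := (nums.drop i).take κ with hsubdef
  have hlen : sub.length = κ := by
    simp [hsubdef]
    omega
  have hsubj : ∀ j, j < κ → sub.getD j 0 = pvG nums (i + j) := by
    intro j hj
    have hj' : j < sub.length := by omega
    rw [List.getD_eq_getElem sub 0 hj']
    have : sub[j] = nums[i + j]'(by omega) := by
      simp [hsubdef]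
    rw [this, pvG, List.getD_eq_getElem nums 0 (by omega)]
  -- the all-check equals the streak condition
  have hcond : ((PySem.List.pyRange 0 (k - 1) 1).all (fun j =>
        decide (PySem.List.pyGetD sub j 0 ≤ PySem.List.pyGetD sub (j + 1) 0)) = true)
      ↔ κ ≤ pvS nums (i + κ) := by
    rw [PySem.List.pyRange_one]
    have ht : (k - 1 - 0).toNat = κ - 1 := by omega
    rw [ht, List.all_map, List.all_eq_true]
    simp only [Function.comp, List.mem_range, decide_eq_true_eq]
    have hstep : ∀ j : Nat, j < κ - 1 →
        ((PySem.List.pyGetD sub (0 + (j : Int)) 0 ≤ PySem.List.pyGetD sub (0 + (j : Int) + 1) 0)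
          ↔ pvG nums (i + j) ≤ pvG nums (i + j + 1)) := by
      intro j hj
      have h1 : (0 : Int) + (j : Int) = ((j : Nat) : Int) := by omega
      rw [h1]
      have h2 : ((j : Nat) : Int) + 1 = ((j + 1 : Nat) : Int) := by omega
      rw [h2, PySem.List.pyGetD_natCast, PySem.List.pyGetD_natCast]
      rw [hsubj j (by omega), hsubj (j + 1) (by omega)]
      have h3 : i + (j + 1) = i + j + 1 := by omega
      rw [h3]
    rw [pvS_ge_iff nums (i + κ) κ hκ (by omega)]
    constructor
    · intro h j hj hjm
      have hji : j - i < κ - 1 := by omega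
      have := (hstep (j - i) hji).mp (h (j - i) hji)
      have he : i + (j - i) = j := by omega
      rw [he] at this
      have he2 : j + 1 = j + 1 := rfl
      simpa [he] using this
    · intro h j hj
      exact (hstep j hj).mpr (h (i + j) (by omega) (by omega))
  by_cases hC : κ ≤ pvS nums (i + κ)
  · rw [if_pos (hcond.mpr hC), if_pos hC]
    -- window is non-decreasing: its max is its last element
    have hne : sub ≠ [] := by
      intro h; rw [h] at hlen; simp at hlen; omega
    obtain ⟨x, t, hxt⟩ := List.exists_cons_of_ne_nil hne
    have hchain : List.IsChain (· ≤ ·) sub := by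
      rw [List.isChain_iff_getElem]
      intro p hp
      have hp' : p + 1 < κ := by omega
      have e1 : sub[p] = pvG nums (i + p) := by
        rw [← List.getD_eq_getElem sub 0 (by omega)]; exact hsubj p (by omega)
      have e2 : sub[p + 1] = pvG nums (i + p + 1) := by
        rw [← List.getD_eq_getElem sub 0 (by omega)]
        have : i + (p + 1) = i + p + 1 := by omega
        rw [hsubj (p + 1) (by omega), this]
      rw [e1, e2]
      exact ((pvS_ge_iff nums (i + κ) κ hκ (by omega)).mp hC) (i + p) (by omega) (by omega)
    rw [hxt, PySem.List.max?_id_cons, Option.getD_some]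
    rw [pvFoldlMaxLast t x (hxt ▸ hchain)]
    have hlast : (x :: t).getLast (by simp) = sub[κ - 1]'(by omega) := by
      rw [List.getLast_eq_getElem]
      congr 1 <;> simp [← hxt, hlen]
    rw [hlast, ← List.getD_eq_getElem sub 0 (by omega), hsubj (κ - 1) (by omega)]
    congr 1
    omega
  · rw [if_neg (fun h => hC (hcond.mp h)), if_neg hC]

-- A's loop produces the spec list, window by window
lemma pvA_loop (nums : List Int) (k : Int) (hk : 1 ≤ k) (m : Nat)
    (hm : m ≤ nums.length + 1 - k.toNat) :
    (List.range m).foldl (fun (result : List Int) (j : Nat) =>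
      if (PySem.List.pyRange 0 (k - 1) 1).all (fun j' =>
          decide (PySem.List.pyGetD (PySem.List.slice nums (some ((0 : Int) + (j : Int))) (some ((0 : Int) + (j : Int) + k))) j' 0 ≤
            PySem.List.pyGetD (PySem.List.slice nums (some ((0 : Int) + (j : Int))) (some ((0 : Int) + (j : Int) + k))) (j' + 1) 0)) then
        result ++ [(PySem.List.max? (PySem.List.slice nums (some ((0 : Int) + (j : Int))) (some ((0 : Int) + (j : Int) + k))) (fun y => y)).getD 0]
      else result ++ [-1]) []
    = (List.range m).map (fun i =>
        if k.toNat ≤ pvS nums (i + k.toNat) then pvG nums (i + k.toNat - 1) else -1) := by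
  induction m with
  | zero => simp
  | succ m ih =>
    have hm' : m ≤ nums.length + 1 - k.toNat := by omega
    rw [List.range_succ, List.foldl_append, List.map_append, ih hm']
    simp only [List.foldl_cons, List.foldl_nil, List.map_cons, List.map_nil]
    have hz : (0 : Int) + (m : Int) = ((m : Nat) : Int) := by omega
    rw [hz]
    rw [pvIteAppend, pvA_entry nums k hk m (by omega)]

-- B's loop invariant: result so far + the current run length
lemma pvB_loop (nums : List Int) (k : Int) (hk : 1 ≤ k) (m : Nat) :
    (List.range m).foldl (fun (st : List Int × Int) (j : Nat) =>
      let result := st.1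
      let run := st.2
      let run :=
        if 0 < (0 : Int) + (j : Int) ∧
            PySem.List.pyGetD nums ((0 : Int) + (j : Int) - 1) 0 ≤ PySem.List.pyGetD nums ((0 : Int) + (j : Int)) 0 then run + 1
        else if 0 < (0 : Int) + (j : Int) then 1 else run
      let result :=
        if k - 1 ≤ (0 : Int) + (j : Int) then
          result ++ [if k ≤ run then PySem.List.pyGetD nums ((0 : Int) + (j : Int)) 0 else -1]
        else result
      (result, run)) ([], (1 : Int))
    = ((List.range (m + 1 - k.toNat)).map (fun i =>
        if k.toNat ≤ pvS nums (i + k.toNat) then pvG nums (i + k.toNat - 1) else -1),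
       (pvS nums m : Int)) := by
  set κ := k.toNat with hκdef
  have hκ : 1 ≤ κ := by omega
  induction m with
  | zero =>
    have h0 : 0 + 1 - κ = 0 := by omega
    simp [h0, pvS]
  | succ m ih =>
    rw [List.range_succ, List.foldl_append, ih]
    simp only [List.foldl_cons, List.foldl_nil]
    have hz : (0 : Int) + (m : Int) = ((m : Nat) : Int) := by omega
    -- the run update computes pvS (m+1)
    have hrun : (if 0 < (0 : Int) + (m : Int) ∧
          PySem.List.pyGetD nums ((0 : Int) + (m : Int) - 1) 0 ≤ PySem.List.pyGetD nums ((0 : Int) + (m : Int)) 0 then (pvS nums m : Int) + 1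
        else if 0 < (0 : Int) + (m : Int) then 1 else (pvS nums m : Int)) = (pvS nums (m + 1) : Int) := by
      by_cases h0 : 0 < m
      · have hm1 : (0 : Int) + (m : Int) - 1 = ((m - 1 : Nat) : Int) := by omega
        rw [hm1, hz, PySem.List.pyGetD_natCast, PySem.List.pyGetD_natCast]
        by_cases hadj : pvG nums (m - 1) ≤ pvG nums m
        · rw [if_pos ⟨by exact_mod_cast h0, hadj⟩]
          conv_rhs => rw [pvS]
          rw [if_pos ⟨h0, hadj⟩]
          push_cast; ring
        · rw [if_neg (by rw [pvG, pvG] at hadj; tauto), if_pos (by exact_mod_cast h0)]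
          conv_rhs => rw [pvS]
          rw [if_neg (by tauto), if_pos h0]
          norm_num
      · have hm0 : m = 0 := by omega
        subst hm0
        norm_num
        conv_rhs => rw [pvS]
        norm_num
    rw [hrun]
    -- the result update appends exactly when a window ends here
    by_cases hw : κ ≤ m + 1
    · have hcnd : k - 1 ≤ (0 : Int) + (m : Int) := by omega
      rw [if_pos hcnd]
      have hr : m + 1 + 1 - κ = (m + 1 - κ) + 1 := by omega
      rw [hr, List.range_succ, List.map_append]
      have hi : (m + 1 - κ) + κ = m + 1 := by omega
      have hi1 : (m + 1 - κ) + κ - 1 = m := by omega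
      simp only [List.map_cons, List.map_nil, hi, Nat.add_sub_cancel]
      have hval : (if k ≤ (pvS nums (m + 1) : Int) then PySem.List.pyGetD nums ((0 : Int) + (m : Int)) 0 else -1)
          = (if κ ≤ pvS nums (m + 1) then pvG nums m else -1) := by
        rw [hz, PySem.List.pyGetD_natCast]
        have : (k ≤ (pvS nums (m + 1) : Int)) ↔ (κ ≤ pvS nums (m + 1)) := by omega
        simp only [this]; rfl
      rw [hval]
    · have hcnd : ¬ (k - 1 ≤ (0 : Int) + (m : Int)) := by omega
      rw [if_neg hcnd]
      have h1 : m + 1 - κ = 0 := by omega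
      have h2 : m + 1 + 1 - κ = 0 := by omega
      rw [h1, h2]

lemma pvA_loop' (nums : List Int) (k : Int) (hk : 1 ≤ k) :
    (PySem.List.pyRange 0 ((nums.length : Int) - k + 1) 1).foldl (fun (result : List Int) (i : Int) =>
      if (PySem.List.pyRange 0 (k - 1) 1).all (fun j =>
          decide (PySem.List.pyGetD (PySem.List.slice nums (some i) (some (i + k))) j 0 ≤
            PySem.List.pyGetD (PySem.List.slice nums (some i) (some (i + k))) (j + 1) 0)) then
        result ++ [(PySem.List.max? (PySem.List.slice nums (some i) (some (i + k))) (fun y => y)).getD 0]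
      else result ++ [-1]) []
    = pvSpec nums k.toNat := by
  rw [PySem.List.pyRange_one 0 ((nums.length : Int) - k + 1), List.foldl_map]
  have hW : ((nums.length : Int) - k + 1 - 0).toNat = nums.length + 1 - k.toNat := by omega
  rw [hW]
  exact pvA_loop nums k hk _ (le_refl _)

lemma power_array_eq_spec (nums : List Int) (k : Int) (hk : 1 ≤ k) :
    power_array nums k = pvSpec nums k.toNat := by
  exact pvA_loop' nums k hk

lemma pvB_loop' (nums : List Int) (k : Int) (hk : 1 ≤ k) :
    ((PySem.List.pyRange 0 (nums.length : Int) 1).foldl (fun (st : List Int × Int) (i : Int) =>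
      let result := st.1
      let run := st.2
      let run :=
        if 0 < i ∧ PySem.List.pyGetD nums (i - 1) 0 ≤ PySem.List.pyGetD nums i 0 then run + 1
        else if 0 < i then 1 else run
      let result :=
        if k - 1 ≤ i then
          result ++ [if k ≤ run then PySem.List.pyGetD nums i 0 else -1]
        else result
      (result, run)) ([], (1 : Int))).1
    = pvSpec nums k.toNat := by
  rw [PySem.List.pyRange_one 0 (nums.length : Int), List.foldl_map]
  have hW : ((nums.length : Int) - 0).toNat = nums.length := by omega
  rw [hW]
  exact congrArg Prod.fst (pvB_loop nums k hk nums.length)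

lemma power_array_alt_eq_spec (nums : List Int) (k : Int) (hk : 1 ≤ k) :
    power_array_alt nums k = pvSpec nums k.toNat := by
  exact pvB_loop' nums k hk

-- ===== VERDICT (by name: the statement is the Claim_ definition above) =====
theorem power_array_spec : Claim_equal_power_array := by
  intro nums k _ hk
  unfold Spec_power_array
  rw [power_array_eq_spec nums k hk, power_array_alt_eq_spec nums k hk]
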